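-- pv_equiv track=rewrite | github.com/CASY82/CHH_StudyRoom | Algo/Greedy/Baek_13417.py | prefer_front
-- ===== SOURCE A (Python) =====
-- from collections import deque
--
-- def prefer_front(dq: deque, x: str) -> bool:
--     if not dq:
--         return True
--
--     n = len(dq)
--     total = n + 1
--
--     def getA(k: int) -> str:
--         return x if k == 0 else dq[k - 1]
--
--     def getB(k: int) -> str:
--         return dq[k] if k < n else x
--
--     for k in range(total):
--         a = getA(k)
--         b = getB(k)
--         if a != b:
--             return a < b
--
--     return True
-- ===== SOURCE B (Python) =====
-- def prefer_front(dq, x: str) -> bool: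
--     # Scan dq: at the first element differing from x, the lexicographic
--     # comparison [x]+dq <= dq+[x] is decided by x < that element;
--     # if every element equals x (or dq is empty), the two sequences are equal.
--     for ch in dq:
--         if ch != x:
--             return x < ch
--     return True
-- ===== Notes on version B (the rewrite author's own statement) =====
-- stated objective: simpler
-- what changed: Replaces the index-paired comparison of [x]+dq vs dq+[x] (closures getA/getB over a range loop) by a single direct scan of dq that compares x against each element and decides at the first difference.
import Mathlib
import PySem

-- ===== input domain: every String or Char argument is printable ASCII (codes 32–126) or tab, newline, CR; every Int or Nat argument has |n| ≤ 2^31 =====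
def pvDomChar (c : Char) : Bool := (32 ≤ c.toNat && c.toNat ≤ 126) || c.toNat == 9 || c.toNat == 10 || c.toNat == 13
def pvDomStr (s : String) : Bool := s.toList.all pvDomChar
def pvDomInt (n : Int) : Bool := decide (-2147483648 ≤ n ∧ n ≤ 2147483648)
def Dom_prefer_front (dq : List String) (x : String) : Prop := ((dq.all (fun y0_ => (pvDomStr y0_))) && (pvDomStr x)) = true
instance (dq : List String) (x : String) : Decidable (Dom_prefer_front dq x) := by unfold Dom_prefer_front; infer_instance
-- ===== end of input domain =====

-- B replaces A's index-paired comparison of [x]+dq vs dq+[x] by a single direct scan of dq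
-- deciding at the first element that differs from x (objective: simpler).

-- ===== PORT A =====
-- getA(k) = x if k == 0 else dq[k-1]; on the loop's indices k ∈ [0, n] the index k-1 is
-- always in range, so pyGetD with a dummy default is exact here.
def pvGetA (dq : List String) (x : String) (k : Int) : String :=
  if k = 0 then x else PySem.List.pyGetD dq (k - 1) ""

-- getB(k) = dq[k] if k < n else x; on the loop's indices k the index is always in range.
def pvGetB (dq : List String) (x : String) (n : Int) (k : Int) : String :=
  if k < n then PySem.List.pyGetD dq k "" else x

-- the 'for k in range(total)' loop with its early return
def pvLoopA (dq : List String) (x : String) (n : Int) : List Int → Bool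
  | [] => true
  | k :: ks =>
      let a := pvGetA dq x k
      let b := pvGetB dq x n k
      if a ≠ b then decide (a < b) else pvLoopA dq x n ks

def prefer_front (dq : List String) (x : String) : Bool :=
  if dq.isEmpty then true
  else
    pvLoopA dq x (PySem.List.len dq)
      (PySem.List.pyRange 0 (PySem.List.len dq + 1) 1)

-- ===== PORT B =====
def prefer_front_alt (dq : List String) (x : String) : Bool :=
  match dq with
  | [] => true
  | ch :: rest => if ch ≠ x then decide (x < ch) else prefer_front_alt rest x

-- ===== PRECONDITION & SPEC =====
def Spec_prefer_front (dq : List String) (x : String) (out : Bool) : Prop := out = prefer_front_alt dq x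
instance (dq : List String) (x : String) (out : Bool) : Decidable (Spec_prefer_front dq x out) := by unfold Spec_prefer_front; infer_instance

-- ===== CLAIM (what is proved, stated in full; the proofs are below) =====
def Claim_equal_prefer_front : Prop := ∀ (dq : List String) (x : String), Dom_prefer_front dq x → Spec_prefer_front dq x (prefer_front dq x)

-- ===== LEMMAS AND PROOFS =====

-- Terminal iteration k = n: getA(n) = dq[n-1] = x (invariant; or x itself when n = 0),
-- getB(n) = x, so the loop falls through its last iteration and returns True.
lemma pvLoopA_last (dq : List String) (x : String)
    (hinv : dq.length ≠ 0 → dq[dq.length - 1]?.getD "" = x) :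
    pvLoopA dq x (PySem.List.len dq)
        (PySem.List.pyRange ((dq.length : ℕ) : Int) (PySem.List.len dq + 1) 1)
      = true := by
  rw [PySem.List.pyRange_one_cons (by simp [PySem.List.len_eq])]
  simp only [pvLoopA]
  have hb : pvGetB dq x (PySem.List.len dq) ((dq.length : ℕ) : Int) = x := by
    simp [pvGetB, PySem.List.len_eq]
  have ha : pvGetA dq x ((dq.length : ℕ) : Int) = x := by
    by_cases h0 : dq.length = 0
    · simp [pvGetA, h0]
    · have hc : ((dq.length : ℕ) : Int) - 1 = ((dq.length - 1 : ℕ) : Int) := by omega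
      simp [pvGetA, h0, hc, PySem.List.pyGetD_natCast]
      exact hinv h0
  rw [ha, hb]
  rw [PySem.List.pyRange_one_eq_nil (by simp [PySem.List.len_eq])]
  simp [pvLoopA]

-- Loop invariant: entering the loop at index j (0 ≤ j ≤ n) with dq[j-1] = x when j ≠ 0,
-- the remaining iterations compute exactly B's scan of the remaining suffix dq.drop j.
lemma pvLoopA_eq_scan (dq : List String) (x : String) :
    ∀ (fuel j : ℕ), dq.length - j ≤ fuel → j ≤ dq.length →
      (j ≠ 0 → dq[j - 1]?.getD "" = x) →
      pvLoopA dq x (PySem.List.len dq)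
          (PySem.List.pyRange (j : Int) (PySem.List.len dq + 1) 1)
        = prefer_front_alt (dq.drop j) x := by
  intro fuel
  induction fuel with
  | zero =>
      intro j hfuel hj hinv
      have hje : j = dq.length := by omega
      subst hje
      rw [pvLoopA_last dq x hinv, List.drop_length]
      rfl
  | succ fuel ih =>
      intro j hfuel hj hinv
      by_cases hje : j = dq.length
      · subst hje
        rw [pvLoopA_last dq x hinv, List.drop_length]
        rfl
      · have hjlt : j < dq.length := by omega
        rw [PySem.List.pyRange_one_cons (by simp [PySem.List.len_eq]; omega)]
        simp only [pvLoopA]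
        have ha : pvGetA dq x ((j : ℕ) : Int) = x := by
          by_cases h0 : j = 0
          · simp [pvGetA, h0]
          · have hc : ((j : ℕ) : Int) - 1 = ((j - 1 : ℕ) : Int) := by omega
            simp [pvGetA, h0, hc, PySem.List.pyGetD_natCast]
            exact hinv h0
        have hb : pvGetB dq x (PySem.List.len dq) ((j : ℕ) : Int) = dq[j] := by
          simp [pvGetB, PySem.List.len_eq, hjlt, PySem.List.pyGetD_natCast,
                List.getD_eq_getElem?_getD]
        rw [ha, hb]
        rw [List.drop_eq_getElem_cons hjlt]
        simp only [prefer_front_alt]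
        by_cases hne : dq[j] = x
        · simp only [hne, ne_eq, not_true_eq_false, ite_false]
          have hcast : ((j : ℕ) : Int) + 1 = (((j + 1 : ℕ)) : Int) := by omega
          rw [hcast]
          refine ih (j + 1) (by omega) (by omega) ?_
          intro _
          simp [List.getElem?_eq_getElem hjlt, hne]
        · have h1 : (x ≠ dq[j]) := fun h => hne h.symm
          rw [if_pos (by simpa using h1), if_pos (by simpa using hne)]

-- ===== VERDICT (by name: the statement is the Claim_ definition above) =====
theorem prefer_front_spec : Claim_equal_prefer_front := by
  unfold Claim_equal_prefer_front Spec_prefer_front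
  intro dq x _
  unfold prefer_front
  by_cases hmt : dq = []
  · subst hmt; rfl
  · rw [if_neg (by simpa [List.isEmpty_iff] using hmt)]
    have h := pvLoopA_eq_scan dq x dq.length 0 (by omega) (by omega) (by simp)
    simpa using h
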